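-- pv_equiv track=rewrite | github.com/nami-ch/DSA-Learning-Repo | Searching&Sorting/Problems/PermuteTwoArrays.py | permuteArrs
-- ===== SOURCE A (Python) =====
-- def permuteArrs(arr1, arr2, K):
--
--     n = len(arr1)
--
--     # sorting in ascending order
--     for i in range(n):
--         for j in range(0, n-i-1):
--             if arr1[j+1] < arr1[j]:
--                 arr1[j], arr1[j+1] = arr1[j+1], arr1[j]
--
--     # sorting in descending order
--     for i in range(n):
--         for j in range(0, n-i-1):
--             if arr2[j] < arr2[j+1]:
--                 arr2[j+1], arr2[j] = arr2[j], arr2[j+1]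
--
--
--     for i in range(n):
--         if arr1[i] + arr2[i] < K:
--             return 'No'
--
--     return 'Yes'
-- ===== SOURCE B (Python) =====
-- def permuteArrs(arr1, arr2, K):
--     # Hall-style counting criterion, no sorting: the optimal pairing (arr1 ascending
--     # with arr2 descending) has all sums >= K  iff  for every x in arr1,
--     # (#elements of arr1 <= x) + (#elements of arr2[:n] < K - x) <= n.
--     n = len(arr1)
--     b = arr2[:n]
--     for x in arr1:
--         le = sum(1 for z in arr1 if z <= x)
--         lt = sum(1 for y in b if y < K - x)
--         if le + lt > n:
--             return 'No'
--     return 'Yes'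
-- ===== Notes on version B (the rewrite author's own statement) =====
-- stated objective: alternative
-- what changed: Replaces A's sort-both-arrays-then-pairwise-check with a sorting-free Hall-type counting criterion: for each x in arr1 it counts elements of arr1 <= x and elements of arr2[:n] < K - x and answers 'No' iff the two counts ever exceed n; no array is ever reordered.
import Mathlib
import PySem

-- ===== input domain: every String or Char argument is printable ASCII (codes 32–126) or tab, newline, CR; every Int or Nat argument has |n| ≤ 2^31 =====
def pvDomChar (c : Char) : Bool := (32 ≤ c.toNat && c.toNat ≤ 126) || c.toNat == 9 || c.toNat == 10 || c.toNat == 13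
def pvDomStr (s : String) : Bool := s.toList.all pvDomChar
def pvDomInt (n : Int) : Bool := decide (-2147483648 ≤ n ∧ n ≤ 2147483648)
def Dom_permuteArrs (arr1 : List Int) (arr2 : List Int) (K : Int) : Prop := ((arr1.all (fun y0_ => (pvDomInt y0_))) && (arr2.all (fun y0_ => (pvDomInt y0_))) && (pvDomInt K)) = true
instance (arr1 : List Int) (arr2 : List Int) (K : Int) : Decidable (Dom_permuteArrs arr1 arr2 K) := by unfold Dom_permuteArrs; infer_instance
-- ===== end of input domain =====

-- B replaces A's two in-place bubble sorts + pairwise check by a sorting-free Hall-type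
-- counting criterion (alternative algorithm, same asymptotic cost). A sorts arr1 and arr2
-- IN PLACE; the equivalence proved here is about the return value only (B does not mutate).

-- ===== PORT A =====
-- inner-loop body of the ascending bubble sort: 'if arr1[j+1] < arr1[j]: swap'.
-- Under Pre_ every index j, j+1 reached is in range, so getD's default is never read.
def pvSwapAsc (l : List Int) (j : Nat) : List Int :=
  let a := l.getD j 0
  let b := l.getD (j + 1) 0
  if b < a then (l.set j b).set (j + 1) a else l

-- inner-loop body of the descending bubble sort: 'if arr2[j] < arr2[j+1]: swap'.
def pvSwapDesc (l : List Int) (j : Nat) : List Int :=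
  let a := l.getD j 0
  let b := l.getD (j + 1) 0
  if a < b then (l.set (j + 1) a).set j b else l

-- the final loop: 'for i in range(n): if arr1[i] + arr2[i] < K: return "No"' then 'return "Yes"'
def pvCheck (a1 a2 : List Int) (K : Int) : List Nat → String
  | [] => "Yes"
  | i :: rest => if a1.getD i 0 + a2.getD i 0 < K then "No" else pvCheck a1 a2 K rest

def permuteArrs (arr1 : List Int) (arr2 : List Int) (K : Int) : String :=
  let n := arr1.length
  let a1 := (List.range n).foldl
      (fun l i => (List.range (n - i - 1)).foldl pvSwapAsc l) arr1
  let a2 := (List.range n).foldl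
      (fun l i => (List.range (n - i - 1)).foldl pvSwapDesc l) arr2
  pvCheck a1 a2 K (List.range n)

-- ===== PORT B =====
-- the loop 'for x in arr1: le = sum(1 for z in arr1 if z <= x); lt = …; if le + lt > n: return "No"'
-- (the generator sums are ported as List.countP, the corresponding library count)
def pvBgo (a b : List Int) (K : Int) (n : Nat) : List Int → String
  | [] => "Yes"
  | x :: rest =>
      if n < a.countP (fun z => decide (z ≤ x)) + b.countP (fun y => decide (y < K - x))
      then "No" else pvBgo a b K n rest

def permuteArrs_alt (arr1 : List Int) (arr2 : List Int) (K : Int) : String :=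
  let n := arr1.length
  let b := PySem.List.slice arr2 none (some (n : Int))
  pvBgo arr1 b K n arr1

-- ===== PRECONDITION & SPEC =====
-- Pre_ excludes exactly the inputs with arr2 shorter than arr1, on which A raises IndexError
-- (every loop bound is n = len(arr1)); A only ever reads arr2[:len(arr1)].
def Pre_permuteArrs (arr1 : List Int) (arr2 : List Int) (K : Int) : Prop :=
  arr1.length ≤ arr2.length
instance (arr1 : List Int) (arr2 : List Int) (K : Int) : Decidable (Pre_permuteArrs arr1 arr2 K) := by
  unfold Pre_permuteArrs; infer_instance

def pvWitness_permuteArrs : List Int × List Int × Int := ([2, 1, 3], [7, 8, 9], 10)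

def Spec_permuteArrs (arr1 : List Int) (arr2 : List Int) (K : Int) (out : String) : Prop := out = permuteArrs_alt arr1 arr2 K
instance (arr1 : List Int) (arr2 : List Int) (K : Int) (out : String) : Decidable (Spec_permuteArrs arr1 arr2 K out) := by unfold Spec_permuteArrs; infer_instance

-- ===== CLAIM (what is proved, stated in full; the proofs are below) =====
def Claim_equal_permuteArrs : Prop := ∀ (arr1 : List Int) (arr2 : List Int) (K : Int), Dom_permuteArrs arr1 arr2 K → Pre_permuteArrs arr1 arr2 K → Spec_permuteArrs arr1 arr2 K (permuteArrs arr1 arr2 K)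

-- ===== LEMMAS AND PROOFS =====

-- the one bubble pass over indices 0..m, written as structural recursion on the list
def pvRP : Nat → List Int → List Int
  | 0, l => l
  | _ + 1, [] => []
  | _ + 1, [a] => [a]
  | m + 1, a :: b :: t => if b < a then b :: pvRP m (a :: t) else a :: pvRP m (b :: t)

-- the outer loop: pass widths k-1, k-2, …, 0
def pvGo : Nat → List Int → List Int
  | 0, l => l
  | k + 1, l => pvGo k (pvRP k l)

theorem pvSwapAsc_cons (x : Int) (l : List Int) (j : Nat) :
    pvSwapAsc (x :: l) (j + 1) = x :: pvSwapAsc l j := by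
  simp [pvSwapAsc]
  split <;> rfl

theorem foldl_swapAsc_map_succ (is : List Nat) (x : Int) (l : List Int) :
    (is.map Nat.succ).foldl pvSwapAsc (x :: l) = x :: is.foldl pvSwapAsc l := by
  induction is generalizing l with
  | nil => rfl
  | cons j js ih => simpa [pvSwapAsc_cons] using ih (pvSwapAsc l j)

theorem inner_eq_rp (m : Nat) (l : List Int) (h : m < l.length) :
    (List.range m).foldl pvSwapAsc l = pvRP m l := by
  induction m generalizing l with
  | zero => rfl
  | succ m ih =>
    match l with
    | [] => simp at h
    | [a] => simp at h
    | a :: b :: t =>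
      rw [List.range_succ_eq_map, List.foldl_cons]
      have h0 : pvSwapAsc (a :: b :: t) 0 = if b < a then b :: a :: t else a :: b :: t := by
        simp [pvSwapAsc]
      rw [h0]
      by_cases hba : b < a
      · rw [if_pos hba, foldl_swapAsc_map_succ, ih _ (by simp at h ⊢; omega)]
        simp [pvRP, hba]
      · rw [if_neg hba, foldl_swapAsc_map_succ, ih _ (by simp at h ⊢; omega)]
        simp [pvRP, hba]

theorem pvRP_perm (m : Nat) (l : List Int) : (pvRP m l).Perm l := by
  induction m generalizing l with
  | zero => exact List.Perm.refl l
  | succ m ih =>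
    match l with
    | [] => exact List.Perm.refl _
    | [a] => exact List.Perm.refl _
    | a :: b :: t =>
      simp only [pvRP]
      split
      · exact ((ih (a :: t)).cons b).trans (List.Perm.swap a b t)
      · exact (ih (b :: t)).cons a

theorem pvRP_append (m : Nat) (u v : List Int) (h : m + 1 ≤ u.length) :
    pvRP m (u ++ v) = pvRP m u ++ v := by
  induction m generalizing u with
  | zero =>
    match u with
    | a :: t => rfl
    | [] => simp at h
  | succ m ih =>
    match u with
    | [] => simp at h
    | [a] => simp at h
    | a :: b :: t =>
      simp only [List.cons_append, pvRP]
      have ht : m + 1 ≤ (a :: t).length := by simp at h ⊢; omega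
      have ht' : m + 1 ≤ (b :: t).length := by simp at h ⊢; omega
      split
      · rw [show a :: (t ++ v) = (a :: t) ++ v from rfl, ih (a :: t) ht]; simp
      · rw [show b :: (t ++ v) = (b :: t) ++ v from rfl, ih (b :: t) ht']; simp

theorem pvGo_append (k : Nat) (u v : List Int) (h : k ≤ u.length) :
    pvGo k (u ++ v) = pvGo k u ++ v := by
  induction k generalizing u with
  | zero => rfl
  | succ k ih =>
    simp only [pvGo]
    rw [pvRP_append k u v h, ih (pvRP k u) (by rw [(pvRP_perm k u).length_eq]; omega)]

theorem pvRP_full (m : Nat) (l : List Int) (h : l.length = m + 1) :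
    ∃ w M, pvRP m l = w ++ [M] ∧ ∀ x ∈ l, x ≤ M := by
  induction m generalizing l with
  | zero =>
    match l with
    | [a] => exact ⟨[], a, rfl, by simp⟩
    | [] => simp at h
    | a :: b :: t => simp at h
  | succ m ih =>
    match l with
    | [] => simp at h
    | [a] => simp at h
    | a :: b :: t =>
      simp only [pvRP]
      by_cases hba : b < a
      · obtain ⟨w, M, hw, hM⟩ := ih (a :: t) (by simp at h ⊢; omega)
        refine ⟨b :: w, M, by simp [hba, hw], ?_⟩
        intro x hx
        simp only [List.mem_cons] at hx
        rcases hx with rfl | rfl | hx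
        · exact hM x (by simp)
        · exact le_of_lt (lt_of_lt_of_le hba (hM a (by simp)))
        · exact hM x (by simp [hx])
      · obtain ⟨w, M, hw, hM⟩ := ih (b :: t) (by simp at h ⊢; omega)
        refine ⟨a :: w, M, by simp [hba, hw], ?_⟩
        intro x hx
        simp only [List.mem_cons] at hx
        rcases hx with rfl | rfl | hx
        · exact le_trans (not_lt.mp hba) (hM b (by simp))
        · exact hM x (by simp)
        · exact hM x (by simp [hx])

theorem outer_eq_go (c : Nat) (l : List Int) (h : c ≤ l.length) :
    (List.range c).foldl (fun acc i => (List.range (c - i - 1)).foldl pvSwapAsc acc) l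
      = pvGo c l := by
  induction c generalizing l with
  | zero => rfl
  | succ c ih =>
    rw [List.range_succ_eq_map, List.foldl_cons, List.foldl_map]
    have hlt : c < l.length := by omega
    have h1 : (List.range (c + 1 - 0 - 1)).foldl pvSwapAsc l = pvRP c l := by
      simpa using inner_eq_rp c l hlt
    rw [h1]
    have hfe : ∀ (acc : List Int) (i : Nat),
        List.foldl pvSwapAsc acc (List.range (c + 1 - Nat.succ i - 1))
          = List.foldl pvSwapAsc acc (List.range (c - i - 1)) := by
      intro acc i
      have : c + 1 - Nat.succ i - 1 = c - i - 1 := by omega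
      rw [this]
    simp only [hfe]
    have hlen : (pvRP c l).length = l.length := (pvRP_perm c l).length_eq
    simp only [pvGo]
    exact ih (pvRP c l) (by omega)

theorem pvGo_key (k : Nat) (u v : List Int) (hu : u.length = k)
    (hv : v.Pairwise (· ≤ ·)) (hcross : ∀ x ∈ u, ∀ y ∈ v, x ≤ y) :
    (pvGo k (u ++ v)).Perm (u ++ v) ∧ (pvGo k (u ++ v)).Pairwise (· ≤ ·) := by
  induction k generalizing u v with
  | zero =>
    match u with
    | [] => exact ⟨List.Perm.refl _, by simpa using hv⟩
    | a :: t => simp at hu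
  | succ k ih =>
    simp only [pvGo]
    rw [pvRP_append k u v (by omega)]
    obtain ⟨w, M, hw, hM⟩ := pvRP_full k u (by omega)
    have hperm : (w ++ [M]).Perm u := hw ▸ pvRP_perm k u
    have hwlen : w.length = k := by
      have := hperm.length_eq; simp at this; omega
    have hMmem : M ∈ u := hperm.mem_iff.mp (by simp)
    have hwsub : ∀ x ∈ w, x ∈ u := fun x hx => hperm.mem_iff.mp (by simp [hx])
    rw [hw, List.append_assoc]
    have hv' : (M :: v).Pairwise (· ≤ ·) := by
      refine List.Pairwise.cons ?_ hv
      intro y hy; exact hcross M hMmem y hy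
    have hcross' : ∀ x ∈ w, ∀ y ∈ M :: v, x ≤ y := by
      intro x hx y hy
      simp only [List.mem_cons] at hy
      rcases hy with rfl | hy
      · exact hM x (hwsub x hx)
      · exact hcross x (hwsub x hx) y hy
    obtain ⟨hp, hs⟩ := ih w (M :: v) hwlen hv' hcross'
    refine ⟨hp.trans ?_, hs⟩
    have h1 : w ++ M :: v = (w ++ [M]) ++ v := by simp
    rw [h1]
    exact hperm.append_right v

theorem pvGo_eq_sorted (l : List Int) :
    pvGo l.length l = PySem.List.sorted l (fun x => x) false := by
  obtain ⟨hp, hs⟩ := pvGo_key l.length l [] rfl (by simp) (by simp)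
  simp only [List.append_nil] at hp hs
  exact (PySem.List.sorted_id_eq_of_perm_of_pairwise l (pvGo l.length l) hp hs).symm

-- n passes of the ascending bubble sort (n ≤ len): the first n elements get sorted, the rest stay
theorem bubbleAsc_take (n : Nat) (l : List Int) (h : n ≤ l.length) :
    (List.range n).foldl
        (fun acc i => (List.range (n - i - 1)).foldl pvSwapAsc acc) l
      = PySem.List.sorted (l.take n) (fun x => x) false ++ l.drop n := by
  rw [outer_eq_go n l h]
  have hlen : (l.take n).length = n := by simp [h]
  calc pvGo n l = pvGo n (l.take n ++ l.drop n) := by rw [List.take_append_drop]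
  _ = pvGo n (l.take n) ++ l.drop n := pvGo_append n _ _ (by omega)
  _ = PySem.List.sorted (l.take n) (fun x => x) false ++ l.drop n := by
      have hg := pvGo_eq_sorted (l.take n)
      rw [hlen] at hg
      rw [hg]

-- ===== the descending sort, via negation =====

theorem getD_map_neg (l : List Int) (j : Nat) :
    (l.map (fun x => -x)).getD j 0 = -(l.getD j 0) := by
  induction l generalizing j with
  | nil => simp
  | cons a t ih =>
    cases j with
    | zero => simp
    | succ j => simpa using ih j

theorem swapAsc_neg (l : List Int) (j : Nat) :
    pvSwapAsc (l.map (fun x => -x)) j = (pvSwapDesc l j).map (fun x => -x) := by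
  simp only [pvSwapAsc, pvSwapDesc, getD_map_neg]
  by_cases h : l.getD j 0 < l.getD (j + 1) 0
  · rw [if_pos (by omega), if_pos h]
    rw [List.map_set, List.map_set,
        List.set_comm _ _ (by omega : j + 1 ≠ j)]
  · rw [if_neg (by omega), if_neg h]

theorem foldl_swap_neg (is : List Nat) (l : List Int) :
    is.foldl pvSwapAsc (l.map (fun x => -x)) = (is.foldl pvSwapDesc l).map (fun x => -x) := by
  induction is generalizing l with
  | nil => rfl
  | cons j js ih => simp only [List.foldl_cons, swapAsc_neg, ih]

theorem bubbleDesc_eq (n : Nat) (l : List Int) :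
    (List.range n).foldl (fun acc i => (List.range (n - i - 1)).foldl pvSwapDesc acc) l
      = ((List.range n).foldl
          (fun acc i => (List.range (n - i - 1)).foldl pvSwapAsc acc)
          (l.map (fun x => -x))).map (fun x => -x) := by
  have key : ∀ (is : List Nat) (l : List Int),
      is.foldl (fun acc i => (List.range (n - i - 1)).foldl pvSwapAsc acc) (l.map (fun x => -x))
        = (is.foldl (fun acc i => (List.range (n - i - 1)).foldl pvSwapDesc acc) l).map
            (fun x => -x) := by
    intro is
    induction is with
    | nil => intro l; rfl
    | cons j js ih =>
      intro l
      simp only [List.foldl_cons, foldl_swap_neg]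
      exact ih _
  rw [key (List.range n) l]
  simp [List.map_map]

-- negating, sorting ascending and negating back is Python's sorted(·, reverse=True)
theorem neg_sorted_neg (l : List Int) :
    (PySem.List.sorted (l.map (fun x => -x)) (fun x => x) false).map (fun x => -x)
      = PySem.List.sorted l (fun x => x) true := by
  set s := PySem.List.sorted (l.map (fun x => -x)) (fun x => x) false with hs
  have hperm1 : (s.map (fun x => -x)).Perm l := by
    have : s.Perm (l.map (fun x => -x)) := PySem.List.sorted_perm _ _ _
    have := this.map (fun x => -x)
    simpa [List.map_map, Function.comp_def] using this
  have hpw1 : (s.map (fun x => -x)).Pairwise (fun a b => b ≤ a) := by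
    rw [List.pairwise_map]
    exact (PySem.List.sorted_pairwise (l.map (fun x => -x)) (fun x => x)).imp
      (fun h => by omega)
  have hperm2 : (PySem.List.sorted l (fun x => x) true).Perm l := PySem.List.sorted_perm _ _ _
  have hpw2 : (PySem.List.sorted l (fun x => x) true).Pairwise (fun a b : Int => b ≤ a) :=
    PySem.List.sorted_pairwise_rev l (fun x => x)
  exact List.Perm.eq_of_pairwise
    (fun a b _ _ h1 h2 => le_antisymm h2 h1) hpw1 hpw2
    (hperm1.trans hperm2.symm)

-- n passes of the descending bubble sort (n ≤ len)
theorem bubbleDesc_take (n : Nat) (l : List Int) (h : n ≤ l.length) :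
    (List.range n).foldl
        (fun acc i => (List.range (n - i - 1)).foldl pvSwapDesc acc) l
      = PySem.List.sorted (l.take n) (fun x => x) true ++ l.drop n := by
  rw [bubbleDesc_eq n l, bubbleAsc_take n (l.map (fun x => -x)) (by simpa using h)]
  rw [List.map_append, ← List.map_take, ← List.map_drop, neg_sorted_neg (l.take n)]
  simp [List.map_map]

-- ===== the check loop =====

theorem pvCheck_map_succ (x y : Int) (xs ys : List Int) (K : Int) (is : List Nat) :
    pvCheck (x :: xs) (y :: ys) K (is.map Nat.succ) = pvCheck xs ys K is := by
  induction is with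
  | nil => rfl
  | cons j js ih => simp only [List.map_cons, pvCheck, List.getD_cons_succ, ih]

-- the final loop reads only indices < n = len(xs); zs is the untouched tail of arr2
theorem pvCheck_eq_all (xs ys zs : List Int) (K : Int) (h : xs.length = ys.length) :
    pvCheck xs (ys ++ zs) K (List.range xs.length)
      = (if (xs.zip ys).all (fun p => decide (K ≤ p.1 + p.2)) then "Yes" else "No") := by
  induction xs generalizing ys with
  | nil => simp [pvCheck]
  | cons x xs ih =>
    match ys with
    | [] => simp at h
    | y :: ys =>
      rw [List.length_cons, List.range_succ_eq_map]
      simp only [List.cons_append, pvCheck, List.getD_cons_zero, List.zip_cons_cons,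
        List.all_cons]
      by_cases hlt : x + y < K
      · rw [if_pos hlt]
        have : ¬ (K ≤ x + y) := by omega
        simp [this]
      · rw [if_neg hlt, pvCheck_map_succ, ih ys (by simpa using h)]
        have hK : K ≤ x + y := by omega
        have hd : (decide (K ≤ x + y) && (xs.zip ys).all fun p => decide (K ≤ p.1 + p.2))
            = (xs.zip ys).all fun p => decide (K ≤ p.1 + p.2) := by
          rw [decide_eq_true hK, Bool.true_and]
        simp only [hd]

-- ===== B side: the counting criterion =====

-- in an ascending list, the first countP(· ≤ x) positions hold elements ≤ x
theorem countLE_prefix (x : Int) (s : List Int) (hs : s.Pairwise (· ≤ ·)) :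
    ∀ i, i < s.countP (fun z => decide (z ≤ x)) → s.getD i 0 ≤ x := by
  induction s with
  | nil => intro i h; simp at h
  | cons a l ih =>
    have hal : ∀ z ∈ l, a ≤ z := (List.pairwise_cons.mp hs).1
    have hl := ih (List.pairwise_cons.mp hs).2
    intro i hi
    by_cases hax : a ≤ x
    · cases i with
      | zero => simpa using hax
      | succ i =>
        rw [List.countP_cons] at hi
        simp [hax] at hi
        simpa using hl i (by omega)
    · have h0 : l.countP (fun z => decide (z ≤ x)) = 0 := by
        rw [List.countP_eq_zero]
        intro z hz
        have := hal z hz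
        simp; omega
      rw [List.countP_cons, h0] at hi
      simp [hax] at hi

-- in a descending list, positions from countP(· ≥ w) on hold elements < w
theorem countGE_suffix (w : Int) (t : List Int) (ht : t.Pairwise (fun a b => b ≤ a)) :
    ∀ i, t.countP (fun y => !decide (y < w)) ≤ i → i < t.length → t.getD i 0 < w := by
  induction t with
  | nil => intro i _ h; simp at h
  | cons a l ih =>
    have hal : ∀ z ∈ l, z ≤ a := (List.pairwise_cons.mp ht).1
    have hl := ih (List.pairwise_cons.mp ht).2
    intro i hc hi
    by_cases haw : a < w
    · cases i with
      | zero => simpa using haw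
      | succ i =>
        have hmem : l.getD i 0 ∈ l := by
          rw [List.getD_eq_getElem l 0 (by simp at hi; omega)]
          exact List.getElem_mem _
        have := hal _ hmem
        simp only [List.getD_cons_succ]
        omega
    · rw [List.countP_cons] at hc
      simp [haw] at hc
      cases i with
      | zero => omega
      | succ i =>
        simp only [List.getD_cons_succ]
        exact hl i (by omega) (by simp at hi; omega)

-- ascending list: at least i+1 elements are ≤ the element at position i
theorem countLE_ge (s : List Int) (hs : s.Pairwise (· ≤ ·)) :
    ∀ i, i < s.length → i + 1 ≤ s.countP (fun z => decide (z ≤ s.getD i 0)) := by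
  induction s with
  | nil => intro i h; simp at h
  | cons a l ih =>
    have hal : ∀ z ∈ l, a ≤ z := (List.pairwise_cons.mp hs).1
    have hl := ih (List.pairwise_cons.mp hs).2
    intro i hi
    cases i with
    | zero =>
      rw [List.countP_cons]
      simp
    | succ i =>
      have hi' : i < l.length := by simp at hi; omega
      have hmem : l.getD i 0 ∈ l := by
        rw [List.getD_eq_getElem l 0 hi']
        exact List.getElem_mem _
      have hax : a ≤ l.getD i 0 := hal _ hmem
      have := hl i hi'
      rw [List.getD_cons_succ, List.countP_cons]
      have hd : decide (a ≤ l.getD i 0) = true := by simpa using hax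
      simp only [hd, if_true]
      omega

-- descending list: if the element at position i is < w, at least len-i elements are < w
theorem countLT_ge (w : Int) (t : List Int) (ht : t.Pairwise (fun a b => b ≤ a)) :
    ∀ i, i < t.length → t.getD i 0 < w → t.length - i ≤ t.countP (fun y => decide (y < w)) := by
  induction t with
  | nil => intro i h; simp at h
  | cons a l ih =>
    have hal : ∀ z ∈ l, z ≤ a := (List.pairwise_cons.mp ht).1
    have hl := ih (List.pairwise_cons.mp ht).2
    intro i hi hw
    cases i with
    | zero =>
      simp only [List.getD_cons_zero] at hw
      have hall : l.countP (fun y => decide (y < w)) = l.length := by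
        rw [List.countP_eq_length]
        intro z hz
        have := hal z hz
        simp; omega
      rw [List.countP_cons, hall]
      simp [hw]
    | succ i =>
      rw [List.getD_cons_succ] at hw
      have := hl i (by simp at hi; omega) hw
      rw [List.countP_cons]
      simp only [List.length_cons]
      omega

-- the pairwise-sum check over the two sorted lists, as an all over the zip, by index
theorem zip_all_iff (K : Int) (s t : List Int) (hlen : t.length = s.length) :
    ((s.zip t).all (fun p => decide (K ≤ p.1 + p.2)) = true) ↔
    ∀ i, i < s.length → K ≤ s.getD i 0 + t.getD i 0 := by
  rw [List.all_eq_true]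
  constructor
  · intro H i hi
    have hz : i < (s.zip t).length := by simp [hlen]; omega
    have := H ((s.zip t)[i]) (List.getElem_mem hz)
    rw [List.getElem_zip] at this
    rw [List.getD_eq_getElem s 0 hi, List.getD_eq_getElem t 0 (by omega)]
    simpa using this
  · intro H p hp
    obtain ⟨i, hi, rfl⟩ := List.mem_iff_getElem.mp hp
    rw [List.getElem_zip]
    have hi' : i < s.length := by simp at hi; omega
    have := H i hi'
    rw [List.getD_eq_getElem s 0 hi', List.getD_eq_getElem t 0 (by omega)] at this
    simpa using this

theorem countP_not_sum (p : Int → Bool) (l : List Int) :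
    l.countP p + l.countP (fun a => !p a) = l.length := by
  induction l with
  | nil => rfl
  | cons a t ih =>
    rw [List.countP_cons, List.countP_cons]
    cases h : p a <;> simp [h] <;> omega

-- the Hall-style core equivalence on the sorted lists
theorem core_iff (K : Int) (s t : List Int) (hs : s.Pairwise (· ≤ ·))
    (ht : t.Pairwise (fun a b => b ≤ a)) (hlen : t.length = s.length) :
    ((s.zip t).all (fun p => decide (K ≤ p.1 + p.2)) = true) ↔
    ∀ x ∈ s, s.countP (fun z => decide (z ≤ x)) + t.countP (fun y => decide (y < K - x))
        ≤ s.length := by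
  rw [zip_all_iff K s t hlen]
  constructor
  · intro H x hx
    by_contra hgt
    push Not at hgt
    have hc1pos : 0 < s.countP (fun z => decide (z ≤ x)) :=
      List.countP_pos_iff.mpr ⟨x, hx, by simp⟩
    have hc1le : s.countP (fun z => decide (z ≤ x)) ≤ s.length := List.countP_le_length
    have hsum : t.countP (fun y => decide (y < K - x))
        + t.countP (fun y => !decide (y < K - x)) = t.length :=
      countP_not_sum (fun y => decide (y < K - x)) t
    set i := s.countP (fun z => decide (z ≤ x)) - 1 with hidef
    have hi : i < s.length := by omega
    have hsx : s.getD i 0 ≤ x := countLE_prefix x s hs i (by omega)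
    have htx : t.getD i 0 < K - x := countGE_suffix (K - x) t ht i (by omega) (by omega)
    have := H i hi
    omega
  · intro H i hi
    by_contra hlt
    push Not at hlt
    set x := s.getD i 0 with hx
    have hxm : x ∈ s := by
      rw [hx, List.getD_eq_getElem s 0 hi]
      exact List.getElem_mem _
    have h1 := countLE_ge s hs i hi
    rw [← hx] at h1
    have h2 := countLT_ge (K - x) t ht i (by omega) (by omega)
    have := H x hxm
    omega

-- B's loop returns "Yes" exactly when no x violates the counting bound
theorem pvBgo_eq (a b : List Int) (K : Int) (n : Nat) (l : List Int) :
    pvBgo a b K n l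
      = if l.all (fun x => decide (a.countP (fun z => decide (z ≤ x))
            + b.countP (fun y => decide (y < K - x)) ≤ n))
        then "Yes" else "No" := by
  induction l with
  | nil => rfl
  | cons x rest ih =>
    simp only [pvBgo, List.all_cons, ih]
    by_cases h : n < a.countP (fun z => decide (z ≤ x)) + b.countP (fun y => decide (y < K - x))
    · rw [if_pos h]
      have : ¬ (a.countP (fun z => decide (z ≤ x))
          + b.countP (fun y => decide (y < K - x)) ≤ n) := by omega
      simp [this]
    · rw [if_neg h]
      have : a.countP (fun z => decide (z ≤ x))
          + b.countP (fun y => decide (y < K - x)) ≤ n := by omega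
      simp [this]

-- ===== VERDICT (by name: the statement is the Claim_ definition above) =====
theorem permuteArrs_spec : Claim_equal_permuteArrs := by
  intro arr1 arr2 K _ hpre
  unfold Spec_permuteArrs
  have hpre' : arr1.length ≤ arr2.length := hpre
  show pvCheck
      ((List.range arr1.length).foldl
        (fun l i => (List.range (arr1.length - i - 1)).foldl pvSwapAsc l) arr1)
      ((List.range arr1.length).foldl
        (fun l i => (List.range (arr1.length - i - 1)).foldl pvSwapDesc l) arr2)
      K (List.range arr1.length)
    = pvBgo arr1 (PySem.List.slice arr2 none (some (arr1.length : Int))) K arr1.length arr1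
  have hslice : PySem.List.slice arr2 none (some (arr1.length : Int))
      = arr2.take arr1.length := by
    rw [PySem.List.slice_to arr2 (by positivity)]
    simp
  rw [hslice]
  have e1 : (List.range arr1.length).foldl
      (fun l i => (List.range (arr1.length - i - 1)).foldl pvSwapAsc l) arr1
      = PySem.List.sorted arr1 (fun x => x) false := by
    have := bubbleAsc_take arr1.length arr1 le_rfl
    simpa using this
  have e2 := bubbleDesc_take arr1.length arr2 hpre'
  rw [e1, e2]
  set s := PySem.List.sorted arr1 (fun x => x) false with hsdef
  set t := PySem.List.sorted (arr2.take arr1.length) (fun x => x) true with htdef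
  have hps : s.Perm arr1 := PySem.List.sorted_perm _ _ _
  have hpt : t.Perm (arr2.take arr1.length) := PySem.List.sorted_perm _ _ _
  have hslen : s.length = arr1.length := hps.length_eq
  have htlen : t.length = arr1.length := by
    rw [hpt.length_eq]; simp [hpre']
  have hsorted_s : s.Pairwise (· ≤ ·) := by
    exact (PySem.List.sorted_pairwise arr1 (fun x => x)).imp (fun h => h)
  have hsorted_t : t.Pairwise (fun a b => b ≤ a) :=
    PySem.List.sorted_pairwise_rev (arr2.take arr1.length) (fun x => x)
  have hl1 : s.length = t.length := by omega
  have hr : List.range arr1.length = List.range s.length := by rw [hslen]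
  rw [hr, pvCheck_eq_all s t (arr2.drop arr1.length) K hl1, pvBgo_eq]
  have hcore := core_iff K s t hsorted_s hsorted_t (by omega)
  have hiff : ((s.zip t).all (fun p => decide (K ≤ p.1 + p.2)) = true) ↔
      (arr1.all (fun x => decide (arr1.countP (fun z => decide (z ≤ x))
        + (arr2.take arr1.length).countP (fun y => decide (y < K - x)) ≤ arr1.length)) = true) := by
    rw [hcore, List.all_eq_true]
    constructor
    · intro H x hx
      have := H x (hps.mem_iff.mpr hx)
      rw [hps.countP_eq, hpt.countP_eq, hslen] at this
      simpa using this
    · intro H x hx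
      have := H x (hps.mem_iff.mp hx)
      rw [hps.countP_eq, hpt.countP_eq, hslen]
      simpa using this
  rcases h1 : (s.zip t).all (fun p => decide (K ≤ p.1 + p.2)) with _ | _
  · have : ¬ (arr1.all (fun x => decide (arr1.countP (fun z => decide (z ≤ x))
        + (arr2.take arr1.length).countP (fun y => decide (y < K - x)) ≤ arr1.length)) = true) := by
      intro hc
      have := hiff.mpr hc
      rw [h1] at this
      exact Bool.false_ne_true this
    simp only [Bool.not_eq_true] at this
    rw [this]
  · have := hiff.mp h1
    rw [this]
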